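-- pv_equiv track=rewrite | github.com/Cracowiatschek/AdventOfCode2015 | Day_20/solution.py | calculate_gifts_with_limit
-- ===== SOURCE A (Python) =====
-- from math import isqrt
--
-- def calculate_gifts_with_limit(house_number):
--     gifts = 0
--     for i in range(1, isqrt(house_number) + 1):
--         if house_number % i == 0:
--             if house_number // i <= 50:
--                 gifts += i * 11
--             if i != house_number // i and i <= 50:
--                 gifts += (house_number // i) * 11
--     return gifts
-- ===== SOURCE B (Python) =====
-- def calculate_gifts_with_limit(house_number):
--     if house_number < 0:
--         raise ValueError("house_number must be non-negative")
--     total = 0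
--     for elf in range(1, 51):
--         if house_number % elf == 0:
--             total += (house_number // elf) * 11
--     return total
-- ===== Notes on version B (the rewrite author's own statement) =====
-- stated objective: faster
-- what changed: Instead of scanning all divisors up to isqrt(n) and pairing each divisor i with its co-divisor n//i, B iterates only over the 50 possible per-elf visit counts e=1..50 and adds 11*(n//e) whenever e divides n; like A it rejects negative house numbers with a ValueError.
import Mathlib
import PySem

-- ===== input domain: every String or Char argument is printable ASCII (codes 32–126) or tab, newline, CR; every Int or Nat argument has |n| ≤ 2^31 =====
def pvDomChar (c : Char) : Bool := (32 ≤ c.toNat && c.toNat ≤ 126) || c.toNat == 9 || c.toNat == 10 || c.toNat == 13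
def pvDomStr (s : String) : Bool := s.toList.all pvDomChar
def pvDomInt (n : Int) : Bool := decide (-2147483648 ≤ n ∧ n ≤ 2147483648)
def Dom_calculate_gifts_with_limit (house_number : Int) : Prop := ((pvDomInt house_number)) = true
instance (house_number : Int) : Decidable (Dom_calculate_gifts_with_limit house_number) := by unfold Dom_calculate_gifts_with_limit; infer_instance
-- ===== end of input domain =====

-- B replaces A's √n divisor-pair scan by a fixed 50-iteration loop over the possible
-- per-elf visit counts e = 1..50, adding 11*(n//e) when e divides n (objective: faster);
-- like A, B raises ValueError on negative house numbers (outside Pre_).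

-- ===== PORT A =====
-- Python's math.isqrt(n) for n ≥ 0 is Nat.sqrt n.toNat; isqrt raises ValueError on n < 0,
-- which Pre_ excludes.
def calculate_gifts_with_limit (house_number : Int) : Int :=
  (PySem.List.pyRange 1 ((Nat.sqrt house_number.toNat : Int) + 1) 1).foldl
    (fun gifts i =>
      if PySem.Int.mod house_number i = 0 then
        let g1 := if PySem.Int.floordiv house_number i ≤ 50 then gifts + i * 11 else gifts
        if i ≠ PySem.Int.floordiv house_number i ∧ i ≤ 50 then
          g1 + PySem.Int.floordiv house_number i * 11
        else g1
      else gifts) 0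

-- ===== PORT B =====
-- (B's negative-input guard raises, which Pre_ excludes; on Pre_ the loop below is all of B.)
def calculate_gifts_with_limit_alt (house_number : Int) : Int :=
  (PySem.List.pyRange 1 51 1).foldl
    (fun total e =>
      if PySem.Int.mod house_number e = 0 then
        total + PySem.Int.floordiv house_number e * 11
      else total) 0

-- ===== PRECONDITION & SPEC =====
-- Pre_ excludes negative house_number, on which both A (math.isqrt) and B (its guard)
-- raise ValueError.
def Pre_calculate_gifts_with_limit (house_number : Int) : Prop := 0 ≤ house_number
instance (house_number : Int) : Decidable (Pre_calculate_gifts_with_limit house_number) := by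
  unfold Pre_calculate_gifts_with_limit; infer_instance

def pvWitness_calculate_gifts_with_limit : Int := 12

def Spec_calculate_gifts_with_limit (house_number : Int) (out : Int) : Prop :=
  out = calculate_gifts_with_limit_alt house_number
instance (house_number : Int) (out : Int) : Decidable (Spec_calculate_gifts_with_limit house_number out) := by
  unfold Spec_calculate_gifts_with_limit; infer_instance

-- ===== CLAIM (what is proved, stated in full; the proofs are below) =====
def Claim_equal_calculate_gifts_with_limit : Prop := ∀ (house_number : Int), Dom_calculate_gifts_with_limit house_number → Pre_calculate_gifts_with_limit house_number → Spec_calculate_gifts_with_limit house_number (calculate_gifts_with_limit house_number)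

-- ===== LEMMAS AND PROOFS =====

-- the per-iteration increment of A's loop, at a Nat divisor candidate
def termA (m i : Nat) : Int :=
  if m % i = 0 then
    (if m / i ≤ 50 then (i : Int) * 11 else 0) +
    (if i ≠ m / i ∧ i ≤ 50 then ((m / i : Nat) : Int) * 11 else 0)
  else 0

-- the per-iteration increment of B's loop
def termB (m e : Nat) : Int :=
  if m % e = 0 then ((m / e : Nat) : Int) * 11 else 0

-- a fold of 'acc + f x' over range(1, k+1) is the sum of f over Icc 1 k
lemma foldl_pyRange_icc (f : Int → Int) (k : Nat) :
    (PySem.List.pyRange 1 ((k : Int) + 1) 1).foldl (fun acc x => acc + f x) 0 =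
      ∑ i ∈ Finset.Icc 1 k, f (i : Int) := by
  induction k with
  | zero => simp [PySem.List.pyRange_one_eq_nil]
  | succ n ih =>
      have h : PySem.List.pyRange 1 ((n : Int) + 1 + 1) 1 =
          PySem.List.pyRange 1 ((n : Int) + 1) 1 ++ [(n : Int) + 1] := by
        have := PySem.List.pyRange_one_succ_right (a := 1) (b := (n : Int) + 1) (by omega)
        simpa using this
      have hsum : ∑ i ∈ Finset.Icc 1 (n + 1), f (i : Int) =
          (∑ i ∈ Finset.Icc 1 n, f (i : Int)) + f ((n + 1 : Nat) : Int) :=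
        Finset.sum_Icc_succ_top (by omega) _
      push_cast at h ⊢
      rw [h, List.foldl_append, ih]
      push_cast at hsum
      simpa using hsum.symm

lemma portA_eq_sum (m : Nat) :
    calculate_gifts_with_limit (m : Int) = ∑ i ∈ Finset.Icc 1 (Nat.sqrt m), termA m i := by
  unfold calculate_gifts_with_limit
  have hfun : (fun (gifts : Int) (i : Int) =>
      if PySem.Int.mod (m : Int) i = 0 then
        let g1 := if PySem.Int.floordiv (m : Int) i ≤ 50 then gifts + i * 11 else gifts
        if i ≠ PySem.Int.floordiv (m : Int) i ∧ i ≤ 50 then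
          g1 + PySem.Int.floordiv (m : Int) i * 11
        else g1
      else gifts) =
      (fun acc x => acc +
        (if PySem.Int.mod (m : Int) x = 0 then
          (if PySem.Int.floordiv (m : Int) x ≤ 50 then x * 11 else 0) +
          (if x ≠ PySem.Int.floordiv (m : Int) x ∧ x ≤ 50 then
            PySem.Int.floordiv (m : Int) x * 11 else 0)
        else 0)) := by
    funext acc x
    simp only []
    split_ifs <;> ring
  simp only [Int.toNat_natCast]
  rw [hfun, foldl_pyRange_icc]
  refine Finset.sum_congr rfl (fun i hi => ?_)
  have hi1 : 1 ≤ i := (Finset.mem_Icc.mp hi).1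
  unfold termA
  simp only [PySem.Int.mod_natCast, PySem.Int.floordiv_natCast, Nat.cast_eq_zero, ne_eq,
    Nat.cast_inj]
  have hdivcast : ((m : Int) / (i : Int)) = ((m / i : Nat) : Int) := (Int.natCast_div m i).symm
  have h50 : ((m : Int) / (i : Int) ≤ 50) ↔ m / i ≤ 50 := by
    rw [hdivcast]; exact_mod_cast Iff.rfl
  simp [h50]

lemma portB_eq_sum (m : Nat) :
    calculate_gifts_with_limit_alt (m : Int) = ∑ e ∈ Finset.Icc 1 50, termB m e := by
  unfold calculate_gifts_with_limit_alt
  have hfun : (fun (total : Int) (e : Int) =>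
      if PySem.Int.mod (m : Int) e = 0 then total + PySem.Int.floordiv (m : Int) e * 11
      else total) =
      (fun acc x => acc +
        (if PySem.Int.mod (m : Int) x = 0 then PySem.Int.floordiv (m : Int) x * 11 else 0)) := by
    funext acc x
    split_ifs <;> ring
  have h51 : (51 : Int) = ((50 : Nat) : Int) + 1 := by norm_num
  rw [hfun, h51, foldl_pyRange_icc]
  refine Finset.sum_congr rfl (fun e he => ?_)
  have he1 : 1 ≤ e := (Finset.mem_Icc.mp he).1
  unfold termB
  have hmod : ((e : Int) ∣ (m : Int)) ↔ m % e = 0 := by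
    rw [Int.natCast_dvd_natCast]
    exact Nat.dvd_iff_mod_eq_zero
  simp [hmod]

-- the heart: for a divisor d of m > 0, A's two contributions at the pair (d, m/d)
-- add up to B's single contribution keyed by the visit count
lemma termA_pair (m d : Nat) (hm : 0 < m) (hd : d ∣ m) :
    (if m / d ≤ Nat.sqrt m ∧ d ≤ 50 then ((m / d : Nat) : Int) * 11 else 0) +
    (if d ≤ Nat.sqrt m ∧ d ≠ m / d ∧ d ≤ 50 then ((m / d : Nat) : Int) * 11 else 0) =
    if d ≤ 50 then ((m / d : Nat) : Int) * 11 else 0 := by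
  have hd0 : 0 < d := Nat.pos_of_dvd_of_pos hd hm
  have hq0 : 0 < m / d := Nat.div_pos (Nat.le_of_dvd hm hd) hd0
  have hmul : d * (m / d) = m := Nat.mul_div_cancel' hd
  have h1 : m / d ≤ Nat.sqrt m ↔ m / d ≤ d := by
    rw [Nat.le_sqrt]
    constructor
    · intro h
      have : m / d * (m / d) ≤ d * (m / d) := by rw [hmul]; exact h
      exact Nat.le_of_mul_le_mul_right this hq0
    · intro h
      calc m / d * (m / d) ≤ d * (m / d) := Nat.mul_le_mul_right _ h
        _ = m := hmul
  have h2 : d ≤ Nat.sqrt m ↔ d ≤ m / d := by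
    rw [Nat.le_sqrt]
    constructor
    · intro h
      have : d * d ≤ d * (m / d) := by rw [hmul]; exact h
      exact Nat.le_of_mul_le_mul_left this hd0
    · intro h
      calc d * d ≤ d * (m / d) := Nat.mul_le_mul_left _ h
        _ = m := hmul
  revert h1 h2
  generalize Nat.sqrt m = s
  generalize hq : m / d = q
  intro h1 h2
  split_ifs <;> omega

lemma key_sum_eq (m : Nat) :
    ∑ i ∈ Finset.Icc 1 (Nat.sqrt m), termA m i = ∑ e ∈ Finset.Icc 1 50, termB m e := by
  rcases Nat.eq_zero_or_pos m with hm | hm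
  · subst hm
    simp [termA, termB]
  -- rewrite both sums as sums over divisors of m
  have hdvd : ∀ i : ℕ, 1 ≤ i → (m % i = 0 ↔ i ∣ m) := fun i _ =>
    Nat.dvd_iff_mod_eq_zero.symm
  have hLHS : ∑ i ∈ Finset.Icc 1 (Nat.sqrt m), termA m i =
      ∑ d ∈ m.divisors, (if d ≤ Nat.sqrt m then
        (if m / d ≤ 50 then (d : Int) * 11 else 0) +
        (if d ≠ m / d ∧ d ≤ 50 then ((m / d : Nat) : Int) * 11 else 0) else 0) := by
    unfold termA
    rw [← Finset.sum_filter, ← Finset.sum_filter]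
    apply Finset.sum_congr
    · apply Finset.ext
      intro d
      simp only [Finset.mem_filter, Finset.mem_Icc, Nat.mem_divisors]
      constructor
      · rintro ⟨⟨h1, h2⟩, h3⟩
        exact ⟨⟨(hdvd d h1).mp h3, by omega⟩, h2⟩
      · rintro ⟨⟨h1, _⟩, h2⟩
        have hd0 : 0 < d := Nat.pos_of_dvd_of_pos h1 hm
        exact ⟨⟨by omega, h2⟩, (hdvd d hd0).mpr h1⟩
    · intro d _; rfl
  have hRHS : ∑ e ∈ Finset.Icc 1 50, termB m e =
      ∑ d ∈ m.divisors, (if d ≤ 50 then ((m / d : Nat) : Int) * 11 else 0) := by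
    unfold termB
    rw [← Finset.sum_filter, ← Finset.sum_filter]
    apply Finset.sum_congr
    · apply Finset.ext
      intro d
      simp only [Finset.mem_filter, Finset.mem_Icc, Nat.mem_divisors]
      constructor
      · rintro ⟨⟨h1, h2⟩, h3⟩
        exact ⟨⟨(hdvd d h1).mp h3, by omega⟩, h2⟩
      · rintro ⟨⟨h1, _⟩, h2⟩
        have hd0 : 0 < d := Nat.pos_of_dvd_of_pos h1 hm
        exact ⟨⟨by omega, h2⟩, (hdvd d hd0).mpr h1⟩
    · intro d _; rfl
  rw [hLHS, hRHS]
  -- split A's sum into the two contributions and reflect the first through d ↦ m / d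
  have hsplit : ∀ d ∈ m.divisors,
      (if d ≤ Nat.sqrt m then
        (if m / d ≤ 50 then (d : Int) * 11 else 0) +
        (if d ≠ m / d ∧ d ≤ 50 then ((m / d : Nat) : Int) * 11 else 0) else 0) =
      (if d ≤ Nat.sqrt m ∧ m / d ≤ 50 then (d : Int) * 11 else 0) +
      (if d ≤ Nat.sqrt m ∧ d ≠ m / d ∧ d ≤ 50 then ((m / d : Nat) : Int) * 11 else 0) := by
    intro d _
    split_ifs <;> simp_all
  rw [Finset.sum_congr rfl hsplit, Finset.sum_add_distrib]
  have hrefl : ∑ d ∈ m.divisors, (if d ≤ Nat.sqrt m ∧ m / d ≤ 50 then (d : Int) * 11 else 0) =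
      ∑ d ∈ m.divisors, (if m / d ≤ Nat.sqrt m ∧ d ≤ 50 then ((m / d : Nat) : Int) * 11 else 0) := by
    rw [← Nat.sum_div_divisors m (fun e => if e ≤ Nat.sqrt m ∧ m / e ≤ 50 then (e : Int) * 11 else 0)]
    apply Finset.sum_congr rfl
    intro d hd
    obtain ⟨hdvd', hm0⟩ := Nat.mem_divisors.mp hd
    rw [Nat.div_div_self hdvd' hm0]
  rw [hrefl, ← Finset.sum_add_distrib]
  apply Finset.sum_congr rfl
  intro d hd
  obtain ⟨hdvd', _⟩ := Nat.mem_divisors.mp hd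
  exact termA_pair m d hm hdvd'

-- ===== VERDICT (by name: the statement is the Claim_ definition above) =====
theorem calculate_gifts_with_limit_spec : Claim_equal_calculate_gifts_with_limit := by
  intro n _ hpre
  unfold Spec_calculate_gifts_with_limit
  have hn : ((n.toNat : Nat) : Int) = n := Int.toNat_of_nonneg hpre
  calc calculate_gifts_with_limit n
      = calculate_gifts_with_limit ((n.toNat : Nat) : Int) := by rw [hn]
    _ = calculate_gifts_with_limit_alt ((n.toNat : Nat) : Int) := by
        rw [portA_eq_sum, portB_eq_sum, key_sum_eq]
    _ = calculate_gifts_with_limit_alt n := by rw [hn]
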